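-- pv_equiv track=rewrite | github.com/circuitbreak98/python-daily-study | ex12.py | most_repeating_word1
-- ===== SOURCE A (Python) =====
-- from collections import Counter
--
-- def most_repeating_word1(words):
--     most_word = ''
--     most_count = 0
--     for word in words[1:]:
--         count = Counter(word).most_common()[0][1]
--         if(most_count<count):
--             most_word = word
--             most_count = count
--     return most_word
-- ===== SOURCE B (Python) =====
-- from collections import Counter
--
--
-- def most_repeating_word1(words):
--     ranked = sorted(words[1:], key=lambda w: max(Counter(w).values()), reverse=True)
--     return ranked[0] if ranked else ''
-- ===== Notes on version B (the rewrite author's own statement) =====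
-- stated objective: alternative
-- what changed: B stably sorts the tail of words descending by each word's top character frequency (computed as max over Counter values, not via most_common's sort) and returns the sorted list's head, replacing A's running (best-word, best-count) accumulator loop; stability makes the head the earliest word with the maximal score, matching A's strict-< update.
import Mathlib
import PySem

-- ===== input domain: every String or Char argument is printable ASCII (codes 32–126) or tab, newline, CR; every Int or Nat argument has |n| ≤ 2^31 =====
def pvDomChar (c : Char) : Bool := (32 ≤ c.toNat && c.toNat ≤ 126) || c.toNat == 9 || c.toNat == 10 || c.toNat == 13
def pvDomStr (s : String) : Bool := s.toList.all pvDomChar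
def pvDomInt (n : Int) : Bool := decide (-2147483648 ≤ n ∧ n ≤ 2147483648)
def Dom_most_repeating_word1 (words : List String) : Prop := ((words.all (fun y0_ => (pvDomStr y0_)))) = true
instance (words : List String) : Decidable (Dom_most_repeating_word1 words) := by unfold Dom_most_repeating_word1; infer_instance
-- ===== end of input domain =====

-- B stably sorts the tail descending by each word's top character frequency (max over Counter values,
-- no most_common sort) and returns the head, replacing A's running accumulator; objective: alternative.


-- ===== PORT A =====
-- Counter(word).most_common()[0][1]: sort the counter's items by count with Python's stable reverse
-- sort, take the first item's count. On an empty word Python raises IndexError ([0] of []); those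
-- inputs are excluded by Pre_ (this port returns 0 there).
def pvTopA (word : String) : Int :=
  match PySem.List.pyGet? (PySem.List.sorted (PySem.Dict.counter word.toList).items (fun kv => kv.2) true) (0 : Int) with
  | some kv => kv.2
  | none => 0

def most_repeating_word1 (words : List String) : String :=
  ((PySem.List.slice words (some 1) none).foldl
    (fun st word =>
      let count := pvTopA word
      if st.2 < count then (word, count) else st)
    ("", 0)).1

-- ===== PORT B =====
-- max(Counter(w).values()): on an empty word Python raises ValueError (max of an empty sequence);
-- those inputs are excluded by Pre_ (this port returns 0 there).
def pvTopB (w : String) : Int :=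
  match PySem.List.max? (PySem.Dict.values (PySem.Dict.counter w.toList)) (fun x => x) with
  | some m => m
  | none => 0

def most_repeating_word1_alt (words : List String) : String :=
  match PySem.List.sorted (PySem.List.slice words (some 1) none) pvTopB true with
  | [] => ""
  | h :: _ => h

-- ===== PRECONDITION & SPEC =====
-- A raises IndexError on any empty word in words[1:] (most_common() of an empty Counter has no first element);
-- Pre_ excludes exactly those inputs (B raises ValueError there too).
def Pre_most_repeating_word1 (words : List String) : Prop := ∀ w ∈ words.tail, w ≠ ""
instance (words : List String) : Decidable (Pre_most_repeating_word1 words) := by unfold Pre_most_repeating_word1; infer_instance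
def pvWitness_most_repeating_word1 : List String := ["ab", "cdd", "ef"]

def Spec_most_repeating_word1 (words : List String) (out : String) : Prop := out = most_repeating_word1_alt words
instance (words : List String) (out : String) : Decidable (Spec_most_repeating_word1 words out) := by unfold Spec_most_repeating_word1; infer_instance

-- ===== CLAIM (what is proved, stated in full; the proofs are below) =====
def Claim_equal_most_repeating_word1 : Prop := ∀ (words : List String), Dom_most_repeating_word1 words → Pre_most_repeating_word1 words → Spec_most_repeating_word1 words (most_repeating_word1 words)

-- ===== LEMMAS AND PROOFS =====

theorem pvToList_ne (w : String) (hw : w ≠ "") : w.toList ≠ [] := by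
  intro h; exact hw (String.toList_eq_nil_iff.mp h)

theorem pvValues_counter (w : String) :
    PySem.Dict.values (PySem.Dict.counter w.toList)
      = (PySem.Set.ofList w.toList).map (fun k => ((w.toList.count k : Int))) := by
  simp [PySem.Dict.values, PySem.Dict.items_counter]

-- a nonempty word's top frequency is at least 1 (it counts some actual character)
theorem pvTopB_pos (w : String) (hw : w ≠ "") : 1 ≤ pvTopB w := by
  obtain ⟨c, cs, hcs⟩ := List.exists_cons_of_ne_nil (pvToList_ne w hw)
  have hcmem : c ∈ PySem.Set.ofList w.toList :=
    (PySem.Set.mem_ofList _ _).mpr (by rw [hcs]; exact List.mem_cons_self)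
  have hvmem : ((w.toList.count c : Int)) ∈ PySem.Dict.values (PySem.Dict.counter w.toList) := by
    rw [pvValues_counter]; exact List.mem_map_of_mem hcmem
  have hcount : 1 ≤ (w.toList.count c : Int) := by
    have : 0 < w.toList.count c := List.count_pos_iff.mpr (by rw [hcs]; exact List.mem_cons_self)
    omega
  cases hm : PySem.List.max? (PySem.Dict.values (PySem.Dict.counter w.toList)) (fun x => x) with
  | none => exact absurd ((PySem.List.max?_eq_none_iff _ _).mp hm) (List.ne_nil_of_mem hvmem)
  | some m =>
    have := PySem.List.max?_isMax hm _ hvmem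
    simp only [pvTopB, hm]
    omega

-- for a nonempty word, the head count of the descending sort and the max over the values coincide
theorem pvTop_eq (w : String) (hw : w ≠ "") : pvTopA w = pvTopB w := by
  obtain ⟨c, cs, hcs⟩ := List.exists_cons_of_ne_nil (pvToList_ne w hw)
  have hcmem : c ∈ PySem.Set.ofList w.toList :=
    (PySem.Set.mem_ofList _ _).mpr (by rw [hcs]; exact List.mem_cons_self)
  have hine : (PySem.Dict.counter w.toList).items ≠ [] := by
    rw [PySem.Dict.items_counter]
    exact List.ne_nil_of_mem (List.mem_map_of_mem hcmem)
  cases hs : PySem.List.sorted (PySem.Dict.counter w.toList).items (fun kv => kv.2) true with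
  | nil => exact absurd ((PySem.List.sorted_eq_nil_iff _ _ _).mp hs) hine
  | cons kv t =>
    have hkv : kv ∈ (PySem.Dict.counter w.toList).items :=
      (PySem.List.mem_sorted _ _ _ _).mp (by rw [hs]; exact List.mem_cons_self)
    have hkvv : kv.2 ∈ PySem.Dict.values (PySem.Dict.counter w.toList) := by
      simp only [PySem.Dict.values]; exact List.mem_map_of_mem hkv
    cases hm : PySem.List.max? (PySem.Dict.values (PySem.Dict.counter w.toList)) (fun x => x) with
    | none => exact absurd ((PySem.List.max?_eq_none_iff _ _).mp hm) (List.ne_nil_of_mem hkvv)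
    | some m =>
      have h1 : kv.2 ≤ m := PySem.List.max?_isMax hm _ hkvv
      have h2 : m ≤ kv.2 := by
        have hmmem := PySem.List.max?_mem hm
        simp only [PySem.Dict.values] at hmmem
        obtain ⟨kv', hkv', hkv'2⟩ := List.mem_map.mp hmmem
        have := PySem.List.key_head_sorted_rev_ge _ _ hs kv' hkv'
        simp only at this
        omega
      simp only [pvTopA, pvTopB, hs, hm, PySem.List.pyGet?_zero_cons]
      omega

-- inserting into a nonempty accumulator: the head is whichever of x and the old head 'before' prefers
theorem pvInsertBy_cons {α : Type} (before : α → α → Bool) (x h : α) (t : List α) :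
    PySem.List.insertBy before x (h :: t)
      = if before x h then x :: h :: t else h :: PySem.List.insertBy before x t := by
  rfl

-- the head of the insertion-sort fold is the running 'before'-preferred element
theorem pvHead_foldl {α : Type} (before : α → α → Bool) :
    ∀ (l : List α) (h : α) (t : List α),
      (l.foldl (fun acc x => PySem.List.insertBy before x acc) (h :: t)).head?
        = some (l.foldl (fun b x => if before x b then x else b) h) := by
  intro l
  induction l with
  | nil => intro h t; simp
  | cons x r ih =>
    intro h t
    simp only [List.foldl_cons, pvInsertBy_cons]
    by_cases hb : before x h
    · simp only [hb, if_pos, ih]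
    · simp only [hb, if_neg, Bool.false_eq_true, not_false_iff, ih]

-- A's pair accumulator, once seeded with an actual word, tracks exactly the running best word
theorem pvPairFold (r : List String) : ∀ (b : String),
    (r.foldl (fun st x => let c := pvTopB x; if st.2 < c then (x, c) else st) (b, pvTopB b)).1
      = r.foldl (fun bb x => if pvTopB bb < pvTopB x then x else bb) b := by
  induction r with
  | nil => intro b; rfl
  | cons x r ih =>
    intro b
    simp only [List.foldl_cons]
    by_cases h : pvTopB b < pvTopB x
    · simp only [h, if_pos, ih]
    · simp only [h, if_neg, not_false_iff, ih]

theorem pvMain (words : List String) (hpre : ∀ w ∈ words.tail, w ≠ "") :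
    most_repeating_word1 words = most_repeating_word1_alt words := by
  unfold most_repeating_word1 most_repeating_word1_alt
  rw [PySem.List.slice_from_one]
  cases htail : words.tail with
  | nil => simp [PySem.List.sorted]
  | cons w r =>
    have hpre' : ∀ x ∈ w :: r, x ≠ "" := fun x hx => hpre x (htail ▸ hx)
    -- A's side: replace pvTopA by pvTopB (words are nonempty), take the first step, then pvPairFold
    have hfold : (w :: r).foldl (fun st word => let c := pvTopA word; if st.2 < c then (word, c) else st) ("", (0:Int))
        = (w :: r).foldl (fun st word => let c := pvTopB word; if st.2 < c then (word, c) else st) ("", (0:Int)) :=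
      PySem.List.foldl_congr_mem _ _ _ _ (by
        intro acc x hx
        simp only
        rw [pvTop_eq x (hpre' x hx)])
    have htw : 1 ≤ pvTopB w := pvTopB_pos w (hpre' w List.mem_cons_self)
    have hstep : (w :: r).foldl (fun st word => let c := pvTopB word; if st.2 < c then (word, c) else st) ("", (0:Int))
        = r.foldl (fun st x => let c := pvTopB x; if st.2 < c then (x, c) else st) (w, pvTopB w) := by
      simp only [List.foldl_cons]
      have : ((0:Int) < pvTopB w) := by omega
      simp [this]
    -- B's side: head of the insertion-sort fold
    have hsortfold : PySem.List.sorted (w :: r) pvTopB true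
        = r.foldl (fun acc x => PySem.List.insertBy (fun a b => decide (pvTopB b < pvTopB a)) x acc) [w] := by
      rw [PySem.List.sorted_rev_eq_foldl_insertBy]
      rfl
    have hhead := pvHead_foldl (fun a b => decide (pvTopB b < pvTopB a)) r w []
    rw [hfold, hstep, pvPairFold]
    rw [hsortfold] at *
    cases hs : r.foldl (fun acc x => PySem.List.insertBy (fun a b => decide (pvTopB b < pvTopB a)) x acc) [w] with
    | nil => rw [hs] at hhead; simp at hhead
    | cons h t =>
      rw [hs] at hhead
      simp only [List.head?_cons, Option.some.injEq] at hhead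
      simp only [decide_eq_true_eq] at hhead
      exact hhead.symm

-- ===== VERDICT (by name: the statement is the Claim_ definition above) =====
theorem most_repeating_word1_spec : Claim_equal_most_repeating_word1 :=
  fun words _hdom hpre => pvMain words hpre
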